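-- pv_equiv track=rewrite | github.com/yaolinmiao/Miao24_Florence | funcs/extraction.py | combine_lists
-- ===== SOURCE A (Python) =====
-- def combine_lists(index_list, value_list):
--
--     index_values_dict = {}
--
--     for index, value in zip(index_list, value_list):
--         if index in index_values_dict:
--             index_values_dict[index].append(value)
--         else:
--             index_values_dict[index] = [value]
--
--     unique_indices = list(index_values_dict.keys())
--     values_sublists = list(index_values_dict.values())
--
--     return unique_indices, values_sublists
-- ===== SOURCE B (Python) =====
-- def combine_lists(index_list, value_list):
--     pairs = list(zip(index_list, value_list))
--     unique_indices = []
--     for i, _ in pairs: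
--         if i not in unique_indices:
--             unique_indices.append(i)
--     values_sublists = [[v for j, v in pairs if j == i] for i in unique_indices]
--     return unique_indices, values_sublists
-- ===== Notes on version B (the rewrite author's own statement) =====
-- stated objective: alternative
-- what changed: Replaces the single-pass dict accumulation with a two-stage traversal: first collect the unique indices in first-occurrence order, then build each sublist by filtering the zipped pairs for that index.
import Mathlib
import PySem

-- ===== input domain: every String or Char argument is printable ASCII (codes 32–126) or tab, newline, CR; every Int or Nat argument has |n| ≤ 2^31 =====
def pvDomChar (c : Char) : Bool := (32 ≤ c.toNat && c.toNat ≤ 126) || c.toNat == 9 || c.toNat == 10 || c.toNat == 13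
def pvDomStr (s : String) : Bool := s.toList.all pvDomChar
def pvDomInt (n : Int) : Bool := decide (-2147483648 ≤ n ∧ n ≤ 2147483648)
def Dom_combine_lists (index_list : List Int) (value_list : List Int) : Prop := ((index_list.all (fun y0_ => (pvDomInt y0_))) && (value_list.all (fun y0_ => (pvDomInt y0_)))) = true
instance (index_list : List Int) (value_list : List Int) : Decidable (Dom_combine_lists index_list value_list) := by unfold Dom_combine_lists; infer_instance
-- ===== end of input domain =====

-- B groups by a two-stage traversal (unique indices first, then one filter per index) instead of A's
-- single-pass dict accumulation; objective: alternative decomposition, not faster.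

-- ===== PORT A =====
def combine_lists (index_list : List Int) (value_list : List Int) : List Int × List (List Int) :=
  let d := (index_list.zip value_list).foldl
    (fun d p => if d.contains p.1 then d.modify p.1 [] (fun l => l ++ [p.2]) else d.insert p.1 [p.2])
    PySem.Dict.empty
  (d.keys, d.values)

-- ===== PORT B =====
def combine_lists_alt (index_list : List Int) (value_list : List Int) : List Int × List (List Int) :=
  let pairs := index_list.zip value_list
  let unique_indices : PySem.Set Int := pairs.foldl (fun s p => PySem.Set.add s p.1) PySem.Set.empty
  (unique_indices, unique_indices.map (fun u => (pairs.filter (fun p => p.1 == u)).map (fun p => p.2)))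

-- ===== PRECONDITION & SPEC =====
def Spec_combine_lists (index_list : List Int) (value_list : List Int) (out : List Int × List (List Int)) : Prop := out = combine_lists_alt index_list value_list
instance (index_list : List Int) (value_list : List Int) (out : List Int × List (List Int)) : Decidable (Spec_combine_lists index_list value_list out) := by unfold Spec_combine_lists; infer_instance

-- ===== CLAIM (what is proved, stated in full; the proofs are below) =====
def Claim_equal_combine_lists : Prop := ∀ (index_list : List Int) (value_list : List Int), Dom_combine_lists index_list value_list → Spec_combine_lists index_list value_list (combine_lists index_list value_list)

-- ===== LEMMAS AND PROOFS =====

-- A's two branches are together exactly one Dict.modify step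
theorem pv_stepA_eq_modify (d : PySem.Dict Int (List Int)) (p : Int × Int) :
    (if d.contains p.1 then d.modify p.1 [] (fun l => l ++ [p.2]) else d.insert p.1 [p.2])
      = d.modify p.1 [] (fun l => l ++ [p.2]) := by
  by_cases h : d.contains p.1 = true
  · simp [h]
  · have hn : d.get? p.1 = none := by
      rw [PySem.Dict.get?_eq_none_iff_contains]; exact eq_false_of_ne_true h
    simp [PySem.Dict.modify, PySem.Dict.getD, hn, h]

theorem pv_foldA_eq_modify (pairs : List (Int × Int)) :
    pairs.foldl
      (fun d p => if d.contains p.1 then d.modify p.1 [] (fun l => l ++ [p.2]) else d.insert p.1 [p.2])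
      PySem.Dict.empty
    = pairs.foldl (fun d p => d.modify p.1 [] (fun l => l ++ [p.2])) PySem.Dict.empty := by
  have h : (fun (d : PySem.Dict Int (List Int)) (p : Int × Int) =>
      if d.contains p.1 then d.modify p.1 [] (fun l => l ++ [p.2]) else d.insert p.1 [p.2])
      = fun d p => d.modify p.1 [] (fun l => l ++ [p.2]) :=
    funext fun d => funext fun p => pv_stepA_eq_modify d p
  rw [h]

-- ===== VERDICT (by name: the statement is the Claim_ definition above) =====
theorem combine_lists_spec : Claim_equal_combine_lists := by
  intro index_list value_list _
  unfold Spec_combine_lists combine_lists combine_lists_alt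
  rw [pv_foldA_eq_modify]
  set pairs := index_list.zip value_list with hp
  set d := pairs.foldl (fun d p => d.modify p.1 [] (fun l => l ++ [p.2])) PySem.Dict.empty with hd
  have hkeys : d.keys = pairs.foldl (fun s p => PySem.Set.add s p.1) PySem.Set.empty := by
    rw [hd, PySem.Dict.keys_foldl_modify_key]
    simp [PySem.Set.update, List.foldl_map, PySem.Set.empty]
  have hnd : d.keys.Nodup := by
    rw [hd]; exact PySem.Dict.nodup_keys_foldl_modify_key _ _ _ _ _ PySem.Dict.nodup_keys_empty
  have hget : ∀ u, d.getD u [] = (pairs.filter (fun p => p.1 == u)).map (fun p => p.2) := by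
    intro u
    rw [hd, PySem.Dict.getD_foldl_modify_append]
    simp
  have hvals : d.values = d.keys.map (fun u => (pairs.filter (fun p => p.1 == u)).map (fun p => p.2)) := by
    rw [PySem.Dict.values_eq_map_keys d hnd []]
    exact List.map_congr_left fun u _ => hget u
  simp only [Prod.mk.injEq]
  exact ⟨hkeys, by rw [hvals, hkeys]⟩
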